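-- pv_equiv track=rewrite | github.com/jcathalina/Rxitect | rxitect/gflownet/algorithms/experimental_batch_sub_trajectory_balance.py | _bundle_sub_traj_batch_index_ranges
-- ===== SOURCE A (Python) =====
-- import math
--
-- def _bundle_sub_traj_batch_index_ranges(traj_lens, lst_lst):
--     max_traj_possible = math.comb(max(traj_lens) + 1, 2)  # n+1 choose 2 possible sub-trajectories.
--     final_stuff = []
--     nT = len(traj_lens)
--     for i in range(max_traj_possible):
--         stuff = []
--         for j in range(nT):
--             try:
--                 x = lst_lst[j][i]
--                 stuff.append(x)
--             except IndexError:
--                 continue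
--         final_stuff.append(stuff)
--     return final_stuff
-- ===== SOURCE B (Python) =====
-- def _bundle_sub_traj_batch_index_ranges(traj_lens, lst_lst):
--     n = max(traj_lens) + 1
--     buckets = [[] for _ in range(n * (n - 1) // 2)]
--     for row in lst_lst[:len(traj_lens)]:
--         for bucket, x in zip(buckets, row):
--             bucket.append(x)
--     return buckets
-- ===== Notes on version B (the rewrite author's own statement) =====
-- stated objective: faster
-- what changed: Replaces the O(M*nT) double scan over all M = comb(max+1,2) bucket indices by preallocating the M buckets once and making a single pass over each inner list, zipping it with the buckets (total work O(M + total elements)).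
import Mathlib
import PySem

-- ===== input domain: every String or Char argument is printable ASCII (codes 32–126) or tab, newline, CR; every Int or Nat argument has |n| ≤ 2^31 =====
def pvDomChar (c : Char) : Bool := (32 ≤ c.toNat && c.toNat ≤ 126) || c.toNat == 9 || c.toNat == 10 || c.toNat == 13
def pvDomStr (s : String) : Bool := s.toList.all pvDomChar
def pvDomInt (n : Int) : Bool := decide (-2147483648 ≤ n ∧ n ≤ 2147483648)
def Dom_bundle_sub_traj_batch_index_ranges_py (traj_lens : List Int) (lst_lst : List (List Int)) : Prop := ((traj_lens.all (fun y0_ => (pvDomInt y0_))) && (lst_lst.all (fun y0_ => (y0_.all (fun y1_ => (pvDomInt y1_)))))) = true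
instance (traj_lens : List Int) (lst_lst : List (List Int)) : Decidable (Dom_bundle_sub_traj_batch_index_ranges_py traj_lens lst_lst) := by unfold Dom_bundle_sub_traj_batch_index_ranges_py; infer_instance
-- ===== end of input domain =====

-- B preallocates the comb(max+1,2) buckets once and fills them in a single pass
-- over the inner lists (zip-style), instead of A's scan of every inner list per bucket index.

-- ===== PORT A =====
-- for i in range(max_traj_possible): for j in range(nT): try x = lst_lst[j][i] …
-- both IndexErrors (j out of range of lst_lst, i out of range of the row) are caught → the
-- guarded lookup is lst_lst[j]?.bind (·[i]?); indices are nonnegative, so getElem? is exact.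
-- final_stuff is a Python list (a dynamic array): final_stuff.append(stuff) → Array.push.
def bundle_sub_traj_batch_index_ranges_py (traj_lens : List Int) (lst_lst : List (List Int)) : List (List Int) :=
  let max_traj_possible : Nat := ((traj_lens.max?.getD 0 + 1).toNat).choose 2
  let nT : Nat := traj_lens.length
  ((List.range max_traj_possible).foldl (fun final_stuff i =>
    final_stuff.push ((List.range nT).foldl (fun stuff j =>
      match lst_lst[j]?.bind (fun row => row[i]?) with
      | some x => stuff ++ [x]
      | none => stuff) [])) #[]).toList

-- ===== PORT B =====
-- `for bucket, x in zip(buckets, row): bucket.append(x)` — zip truncates to the shorter list.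
def pvAppendRow : List (List Int) → List Int → List (List Int)
  | bs, [] => bs
  | [], _ => []
  | b :: bs, x :: xs => (b ++ [x]) :: pvAppendRow bs xs

def bundle_sub_traj_batch_index_ranges_py_alt (traj_lens : List Int) (lst_lst : List (List Int)) : List (List Int) :=
  let n : Int := traj_lens.max?.getD 0 + 1
  let buckets : List (List Int) := List.replicate (PySem.Int.floordiv (n * (n - 1)) 2).toNat []
  (lst_lst.take traj_lens.length).foldl pvAppendRow buckets

-- ===== PRECONDITION & SPEC =====
-- Pre_ excludes exactly the inputs where the Python A raises: max([]) raises ValueError on an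
-- empty traj_lens, and math.comb(max+1, 2) raises ValueError when max(traj_lens) < -1.
def Pre_bundle_sub_traj_batch_index_ranges_py (traj_lens : List Int) (lst_lst : List (List Int)) : Prop :=
  traj_lens ≠ [] ∧ ∃ x ∈ traj_lens, -1 ≤ x
instance (traj_lens : List Int) (lst_lst : List (List Int)) : Decidable (Pre_bundle_sub_traj_batch_index_ranges_py traj_lens lst_lst) := by unfold Pre_bundle_sub_traj_batch_index_ranges_py; infer_instance

def pvWitness_bundle_sub_traj_batch_index_ranges_py : List Int × List (List Int) := ([2, 1], [[10, 20, 30], [40]])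

def Spec_bundle_sub_traj_batch_index_ranges_py (traj_lens : List Int) (lst_lst : List (List Int)) (out : List (List Int)) : Prop := out = bundle_sub_traj_batch_index_ranges_py_alt traj_lens lst_lst
instance (traj_lens : List Int) (lst_lst : List (List Int)) (out : List (List Int)) : Decidable (Spec_bundle_sub_traj_batch_index_ranges_py traj_lens lst_lst out) := by unfold Spec_bundle_sub_traj_batch_index_ranges_py; infer_instance

-- ===== CLAIM (what is proved, stated in full; the proofs are below) =====
def Claim_equal_bundle_sub_traj_batch_index_ranges_py : Prop := ∀ (traj_lens : List Int) (lst_lst : List (List Int)), Dom_bundle_sub_traj_batch_index_ranges_py traj_lens lst_lst → Pre_bundle_sub_traj_batch_index_ranges_py traj_lens lst_lst → Spec_bundle_sub_traj_batch_index_ranges_py traj_lens lst_lst (bundle_sub_traj_batch_index_ranges_py traj_lens lst_lst)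

-- ===== LEMMAS AND PROOFS =====

theorem pvAppendRow_getElem? (bs : List (List Int)) (row : List Int) (i : Nat) :
    (pvAppendRow bs row)[i]? = bs[i]?.map (fun b => b ++ row[i]?.toList) := by
  induction bs generalizing row i with
  | nil => cases row <;> simp [pvAppendRow]
  | cons b bs ih =>
    cases row with
    | nil => cases i <;> simp [pvAppendRow]
    | cons x xs => cases i <;> simp [pvAppendRow, ih]

theorem foldl_pvAppendRow_getElem? (rows : List (List Int)) (bs : List (List Int)) (i : Nat) :
    (rows.foldl pvAppendRow bs)[i]? =
      bs[i]?.map (fun b => b ++ rows.filterMap (fun r => r[i]?)) := by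
  induction rows generalizing bs with
  | nil => simp
  | cons r rs ih =>
    simp only [List.foldl_cons, ih, pvAppendRow_getElem?, List.filterMap_cons]
    cases bs[i]? <;> cases r[i]? <;> simp

theorem inner_loop_eq (lst_lst : List (List Int)) (i : Nat) (n : Nat) (acc : List Int) :
    (List.range n).foldl (fun stuff j =>
      match lst_lst[j]?.bind (fun row => row[i]?) with
      | some x => stuff ++ [x]
      | none => stuff) acc
    = acc ++ (lst_lst.take n).filterMap (fun row => row[i]?) := by
  induction n generalizing acc with
  | zero => simp
  | succ n ih =>
    rw [List.range_succ, List.foldl_append, ih, List.take_add_one, List.filterMap_append]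
    simp only [List.foldl_cons, List.foldl_nil]
    cases h : lst_lst[n]? with
    | none => simp
    | some row => cases h2 : row[i]? <;> simp [h2]

theorem outer_loop_eq (M : Nat) (f : Nat → List Int) (acc : Array (List Int)) :
    ((List.range M).foldl (fun fs i => fs.push (f i)) acc).toList = acc.toList ++ (List.range M).map f := by
  induction M generalizing acc with
  | zero => simp
  | succ M ih => rw [List.range_succ, List.foldl_append]; simp [ih]

theorem bucket_count_eq (m : Int) (h : -1 ≤ m) :
    (PySem.Int.floordiv ((m + 1) * (m + 1 - 1)) 2).toNat = ((m + 1).toNat).choose 2 := by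
  rw [PySem.Int.floordiv_eq_ediv_of_pos (by norm_num), Nat.choose_two_right]
  obtain ⟨k, hk⟩ : ∃ k : Nat, m + 1 = (k : Int) := ⟨(m + 1).toNat, by omega⟩
  have hkt : (m + 1).toNat = k := by omega
  rw [hkt]
  cases k with
  | zero =>
    have hm : m = -1 := by omega
    subst hm; norm_num
  | succ k' =>
    have hm : m = (k' : Int) := by omega
    subst hm
    have h1 : ((k' : Int) + 1) * ((k' : Int) + 1 - 1) = (((k' + 1) * k' : Nat) : Int) := by
      push_cast; ring
    have h2 : k' + 1 - 1 = k' := rfl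
    rw [h1, h2]
    generalize ((k' + 1) * k' : Nat) = n
    omega

theorem max_ge_of_pre (traj_lens : List Int) (hne : traj_lens ≠ [])
    (hx : ∃ x ∈ traj_lens, -1 ≤ x) : -1 ≤ traj_lens.max?.getD 0 := by
  obtain ⟨x, hmem, hxle⟩ := hx
  cases hmax : traj_lens.max? with
  | none => exact absurd (List.max?_eq_none_iff.mp hmax) hne
  | some y =>
    rw [List.max?_eq_some_iff] at hmax
    exact le_trans hxle (by simpa using hmax.2 x hmem)

-- ===== VERDICT (by name: the statement is the Claim_ definition above) =====
theorem bundle_sub_traj_batch_index_ranges_py_spec : Claim_equal_bundle_sub_traj_batch_index_ranges_py := by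
  intro traj_lens lst_lst _hdom hpre
  obtain ⟨hne, hx⟩ := hpre
  unfold Spec_bundle_sub_traj_batch_index_ranges_py
  unfold bundle_sub_traj_batch_index_ranges_py bundle_sub_traj_batch_index_ranges_py_alt
  simp only []
  have hm : -1 ≤ traj_lens.max?.getD 0 := max_ge_of_pre traj_lens hne hx
  set m := traj_lens.max?.getD 0 with hmdef
  have hM : (PySem.Int.floordiv ((m + 1) * (m + 1 - 1)) 2).toNat = ((m + 1).toNat).choose 2 :=
    bucket_count_eq m hm
  set M := ((m + 1).toNat).choose 2 with hMdef
  rw [outer_loop_eq]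
  simp only [List.nil_append]
  apply List.ext_getElem?
  intro i
  rw [foldl_pvAppendRow_getElem?, List.getElem?_map, hM]
  by_cases hi : i < M
  · rw [List.getElem?_range hi, List.getElem?_replicate_of_lt hi]
    simp only [Option.map_some, List.nil_append]
    rw [inner_loop_eq]
    simp
  · rw [List.getElem?_eq_none (by simpa using not_lt.mp hi),
        List.getElem?_eq_none (by simpa using not_lt.mp hi)]
    simp
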